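-- pv_equiv track=rewrite | github.com/Naowak/Alakazam | graphics/test2.py | indices_hex_generator
-- ===== SOURCE A (Python) =====
-- def indices_hex_bot_generator(indice, nb) :
-- 	indice.append(nb+0)
-- 	indice.append(nb+1)
-- 	indice.append(nb+2)
-- 	indice.append(nb+3)
-- 	indice.append(nb+4)
-- 	indice.append(nb+5)
--
-- def indices_hex_top_generator(indice, nb) :
-- 	indice.append(nb+6)
-- 	indice.append(nb+7)
-- 	indice.append(nb+8)
-- 	indice.append(nb+9)
-- 	indice.append(nb+10)
-- 	indice.append(nb+11)
--
-- def indices_hex_generator(i_size, j_size) :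
-- 	indice = list()
-- 	nb = 0
-- 	for j in range(j_size) :
-- 		for i in range(i_size) :
-- 			indices_hex_bot_generator(indice, nb)
-- 			indices_hex_top_generator(indice, nb)
-- 			nb += 12
-- 	return indice
-- ===== SOURCE B (Python) =====
-- def indices_hex_generator(i_size, j_size):
--     # closed form: the nested loops just enumerate 0 .. 12*i_size*j_size - 1
--     return list(range(12 * max(i_size, 0) * max(j_size, 0)))
-- ===== Notes on version B (the rewrite author's own statement) =====
-- stated objective: simpler
-- what changed: Replaced the nested loops with 12 appends per cell and an nb accumulator by the closed form list(range(12*max(i,0)*max(j,0))).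
import Mathlib
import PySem

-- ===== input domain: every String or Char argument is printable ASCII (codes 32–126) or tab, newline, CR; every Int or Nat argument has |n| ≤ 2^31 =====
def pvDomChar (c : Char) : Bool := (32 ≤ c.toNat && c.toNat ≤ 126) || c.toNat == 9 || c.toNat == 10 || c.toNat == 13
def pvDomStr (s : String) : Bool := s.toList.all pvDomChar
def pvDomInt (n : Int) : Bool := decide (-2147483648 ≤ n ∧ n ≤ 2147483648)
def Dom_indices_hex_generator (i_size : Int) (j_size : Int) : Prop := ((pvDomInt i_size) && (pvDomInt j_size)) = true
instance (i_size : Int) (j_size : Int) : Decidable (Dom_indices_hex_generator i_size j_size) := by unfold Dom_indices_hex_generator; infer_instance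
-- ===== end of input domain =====

-- B replaces the nested accumulator loops by the closed form list(range(12*max(i,0)*max(j,0))): simpler, same value.
-- ===== PORT A =====
def indices_hex_bot_generator (indice : List Int) (nb : Int) : List Int :=
  indice ++ [nb+0, nb+1, nb+2, nb+3, nb+4, nb+5]

def indices_hex_top_generator (indice : List Int) (nb : Int) : List Int :=
  indice ++ [nb+6, nb+7, nb+8, nb+9, nb+10, nb+11]

def indices_hex_generator (i_size : Int) (j_size : Int) : List Int :=
  let res := (PySem.List.pyRange 0 j_size 1).foldl (fun s _j =>
    (PySem.List.pyRange 0 i_size 1).foldl (fun s _i =>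
      let indice := indices_hex_top_generator (indices_hex_bot_generator s.1 s.2) s.2
      (indice, s.2 + 12)) s) (([] : List Int), (0 : Int))
  res.1

-- ===== PORT B =====
def indices_hex_generator_alt (i_size : Int) (j_size : Int) : List Int :=
  PySem.List.pyRange 0 (12 * max i_size 0 * max j_size 0) 1

-- ===== PRECONDITION & SPEC =====
def Spec_indices_hex_generator (i_size : Int) (j_size : Int) (out : List Int) : Prop := out = indices_hex_generator_alt i_size j_size
instance (i_size : Int) (j_size : Int) (out : List Int) : Decidable (Spec_indices_hex_generator i_size j_size out) := by unfold Spec_indices_hex_generator; infer_instance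

-- ===== CLAIM (what is proved, stated in full; the proofs are below) =====
def Claim_equal_indices_hex_generator : Prop := ∀ (i_size : Int) (j_size : Int), Dom_indices_hex_generator i_size j_size → Spec_indices_hex_generator i_size j_size (indices_hex_generator i_size j_size)

-- ===== LEMMAS AND PROOFS =====

-- ===== VERDICT (by name: the statement is the Claim_ definition above) =====
-- inner fold invariant: one cell appends the next 12 indices
lemma inner_step (ind : List Int) (nb : Int) :
    indices_hex_top_generator (indices_hex_bot_generator ind nb) nb ++ [] = ind ++ PySem.List.pyRange nb (nb + 12) 1 := by
  have h12 := PySem.List.pyRange_one nb (nb + 12)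
  have he : (nb + 12 - nb).toNat = 12 := by omega
  rw [h12, he]
  simp [indices_hex_bot_generator, indices_hex_top_generator]
  norm_num [List.range_succ]

lemma inner_fold (l : List Int) (ind : List Int) (nb : Int) (h : ind = PySem.List.pyRange 0 nb 1) (h0 : 0 ≤ nb) :
    l.foldl (fun s _i =>
      let indice := indices_hex_top_generator (indices_hex_bot_generator s.1 s.2) s.2
      (indice, s.2 + 12)) (ind, nb)
    = (PySem.List.pyRange 0 (nb + 12 * l.length) 1, nb + 12 * l.length) := by
  induction l generalizing ind nb with
  | nil => simp [h]
  | cons a t ih =>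
    simp only [List.foldl_cons, List.length_cons]
    have hstep : indices_hex_top_generator (indices_hex_bot_generator ind nb) nb
        = PySem.List.pyRange 0 (nb + 12) 1 := by
      have := inner_step ind nb
      simp at this
      rw [this, h, ← PySem.List.pyRange_one_append 0 nb (nb + 12) h0 (by omega)]
    rw [show (fun s : List Int × Int => _) = _ from rfl]
    have := ih (indices_hex_top_generator (indices_hex_bot_generator ind nb) nb) (nb + 12) hstep (by omega)
    have harith : nb + 12 + 12 * (t.length : Int) = nb + 12 * ((t.length : Int) + 1) := by ring
    push_cast at this ⊢
    rw [this, harith]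

lemma outer_fold (l : List Int) (i_size : Int) (ind : List Int) (nb : Int)
    (h : ind = PySem.List.pyRange 0 nb 1) (h0 : 0 ≤ nb) :
    l.foldl (fun s _j =>
      (PySem.List.pyRange 0 i_size 1).foldl (fun s _i =>
        let indice := indices_hex_top_generator (indices_hex_bot_generator s.1 s.2) s.2
        (indice, s.2 + 12)) s) (ind, nb)
    = (PySem.List.pyRange 0 (nb + 12 * (i_size - 0).toNat * l.length) 1,
       nb + 12 * (i_size - 0).toNat * l.length) := by
  induction l generalizing ind nb with
  | nil => simp [h]
  | cons a t ih =>
    simp only [List.foldl_cons, List.length_cons]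
    have hlen : (PySem.List.pyRange 0 i_size 1).length = (i_size - 0).toNat :=
      PySem.List.length_pyRange_one 0 i_size
    have hin := inner_fold (PySem.List.pyRange 0 i_size 1) ind nb h h0
    rw [hlen] at hin
    rw [hin]
    have hI : (0 : Int) ≤ ((i_size - 0).toNat : Int) := Int.natCast_nonneg _
    have := ih (PySem.List.pyRange 0 (nb + 12 * ((i_size - 0).toNat : Int)) 1)
      (nb + 12 * ((i_size - 0).toNat : Int)) rfl (by positivity)
    rw [this]
    have harith : nb + 12 * ((i_size - 0).toNat : Int) + 12 * ((i_size - 0).toNat : Int) * (t.length : Int)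
        = nb + 12 * ((i_size - 0).toNat : Int) * ((t.length : Int) + 1) := by ring
    push_cast at harith ⊢
    rw [harith]

-- ===== VERDICT (by name: the statement is the Claim_ definition above) =====
theorem indices_hex_generator_spec : Claim_equal_indices_hex_generator := by
  intro i_size j_size _
  unfold Spec_indices_hex_generator indices_hex_generator indices_hex_generator_alt
  have h := outer_fold (PySem.List.pyRange 0 j_size 1) i_size [] 0 (by simp) le_rfl
  rw [PySem.List.length_pyRange_one 0 j_size] at h
  simp only [h]
  congr 1
  have hi : ((i_size - 0).toNat : Int) = max i_size 0 := by omega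
  have hj : ((j_size - 0).toNat : Int) = max j_size 0 := by omega
  rw [hi, hj]
  ring
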